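-- pv_equiv track=rewrite | github.com/AytugUlubay/codeWarsPython | kyu7/Kill The Monsters!.py | kill_monsters
-- ===== SOURCE A (Python) =====
-- def kill_monsters(health, monsters, damage):
--     hit=0
--     while monsters>3:
--         monsters-=3
--         hit+=1
--     dmg=damage*hit
--     hlt=health-dmg
--     if hlt<=0:
--         return("hero died")
--     return "hits: {}, damage: {}, health: {}".format(hit,dmg,hlt)
-- ===== SOURCE B (Python) =====
-- def kill_monsters(health, monsters, damage):
--     hit = (monsters - 1) // 3 if monsters > 3 else 0
--     dmg = damage * hit
--     hlt = health - dmg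
--     if hlt <= 0:
--         return "hero died"
--     return "hits: {}, damage: {}, health: {}".format(hit, dmg, hlt)
-- ===== Notes on version B (the rewrite author's own statement) =====
-- stated objective: faster
-- what changed: Replaced A's subtract-3-per-iteration while loop counting hits by the closed-form hit = (monsters-1)//3 when monsters > 3 (else 0).
import Mathlib
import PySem

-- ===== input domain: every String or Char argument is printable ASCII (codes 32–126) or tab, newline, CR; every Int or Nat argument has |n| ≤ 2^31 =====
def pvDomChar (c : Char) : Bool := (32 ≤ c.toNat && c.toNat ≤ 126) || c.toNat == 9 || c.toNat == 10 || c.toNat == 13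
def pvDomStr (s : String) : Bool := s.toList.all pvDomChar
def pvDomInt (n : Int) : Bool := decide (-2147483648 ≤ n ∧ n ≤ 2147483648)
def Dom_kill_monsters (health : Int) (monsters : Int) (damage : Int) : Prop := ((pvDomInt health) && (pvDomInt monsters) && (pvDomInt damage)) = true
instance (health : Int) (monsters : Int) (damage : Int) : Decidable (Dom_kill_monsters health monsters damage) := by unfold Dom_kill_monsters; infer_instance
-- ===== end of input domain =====

-- B replaces A's subtract-3 loop by the closed form hit = (monsters-1)//3 (for monsters > 3); objective: faster (O(1) vs O(monsters)).

-- ===== PORT A =====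
-- A's while loop: returns (final monsters, hit)
def killLoopA (monsters : Int) (hit : Int) : Int × Int :=
  if monsters > 3 then killLoopA (monsters - 3) (hit + 1) else (monsters, hit)
termination_by monsters.toNat
decreasing_by omega

def kill_monsters (health : Int) (monsters : Int) (damage : Int) : String :=
  let p := killLoopA monsters 0
  let hit := p.2
  let dmg := damage * hit
  let hlt := health - dmg
  if hlt ≤ 0 then "hero died"
  else "hits: " ++ PySem.Int.toStr hit ++ ", damage: " ++ PySem.Int.toStr dmg ++ ", health: " ++ PySem.Int.toStr hlt

-- ===== PORT B =====
def kill_monsters_alt (health : Int) (monsters : Int) (damage : Int) : String :=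
  let hit := if monsters > 3 then PySem.Int.floordiv (monsters - 1) 3 else 0
  let dmg := damage * hit
  let hlt := health - dmg
  if hlt ≤ 0 then "hero died"
  else "hits: " ++ PySem.Int.toStr hit ++ ", damage: " ++ PySem.Int.toStr dmg ++ ", health: " ++ PySem.Int.toStr hlt

-- ===== PRECONDITION & SPEC =====
def Spec_kill_monsters (health : Int) (monsters : Int) (damage : Int) (out : String) : Prop := out = kill_monsters_alt health monsters damage
instance (health : Int) (monsters : Int) (damage : Int) (out : String) : Decidable (Spec_kill_monsters health monsters damage out) := by unfold Spec_kill_monsters; infer_instance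

-- ===== CLAIM (what is proved, stated in full; the proofs are below) =====
def Claim_equal_kill_monsters : Prop := ∀ (health : Int) (monsters : Int) (damage : Int), Dom_kill_monsters health monsters damage → Spec_kill_monsters health monsters damage (kill_monsters health monsters damage)

-- ===== LEMMAS AND PROOFS =====
theorem killLoopA_snd (m h : Int) :
    (killLoopA m h).2 = h + (if m > 3 then PySem.Int.floordiv (m - 1) 3 else 0) := by
  induction m, h using killLoopA.induct with
  | case1 m h hm ih =>
      rw [killLoopA]
      simp only [hm, if_pos, ih]
      by_cases h3 : m - 3 > 3
      · rw [if_pos h3]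
        simp only [PySem.Int.floordiv_eq_ediv_of_pos (show (0:Int) < 3 by omega)]
        omega
      · rw [if_neg h3]
        simp only [PySem.Int.floordiv_eq_ediv_of_pos (show (0:Int) < 3 by omega)]
        omega
  | case2 m h hm =>
      rw [killLoopA]
      simp [hm]

-- ===== VERDICT (by name: the statement is the Claim_ definition above) =====
theorem kill_monsters_spec : Claim_equal_kill_monsters := by
  intro health monsters damage _
  unfold Spec_kill_monsters kill_monsters kill_monsters_alt
  simp only [killLoopA_snd, zero_add]
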